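-- pv_equiv track=rewrite | github.com/seoyoungsoo/Programmers_Challenge | Lv2/lv2_전화번호목록.py | otherSol
-- ===== SOURCE A (Python) =====
-- def otherSol(phone_book):
--     answer = True
--     hash = {}
--     for num in phone_book:
--         hash[num] = 1
--     for num in phone_book:
--         tmp = ''
--         for n in num:
--             tmp += n
--             if tmp in hash and tmp != num:
--                 answer = False
--     return answer
--
-- phone_book = ['119', '97674223', '1195524421']
-- ===== SOURCE B (Python) =====
-- def otherSol(phone_book):
--     s = sorted(phone_book)
--     answer = True
--     for i in range(len(s) - 1):
--         if s[i] and s[i + 1].startswith(s[i]) and s[i] != s[i + 1]: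
--             answer = False
--     return answer
-- ===== Notes on version B (the rewrite author's own statement) =====
-- stated objective: alternative
-- what changed: Replaces A's hash-set plus per-number enumeration of every character prefix with sort-then-scan: sort a copy of the list and flag only adjacent pairs where the next entry starts with the previous nonempty, distinct one (a nonempty proper prefix must be adjacent in lexicographic order).
import Mathlib
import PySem

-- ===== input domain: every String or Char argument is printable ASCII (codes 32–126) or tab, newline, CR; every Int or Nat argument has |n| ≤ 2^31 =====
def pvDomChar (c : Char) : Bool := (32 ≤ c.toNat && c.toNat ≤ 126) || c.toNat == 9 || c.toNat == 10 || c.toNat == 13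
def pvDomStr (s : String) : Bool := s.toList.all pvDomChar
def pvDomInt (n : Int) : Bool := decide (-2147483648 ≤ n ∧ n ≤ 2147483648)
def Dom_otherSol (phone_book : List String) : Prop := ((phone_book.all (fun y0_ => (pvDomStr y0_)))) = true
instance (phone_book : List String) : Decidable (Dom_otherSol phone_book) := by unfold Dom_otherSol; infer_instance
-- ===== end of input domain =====

-- B replaces A's hash-set plus enumeration of every character prefix of every number by
-- sort-then-scan over adjacent pairs (a nonempty proper prefix must be adjacent in
-- lexicographic order). B does not mutate its argument (it sorts a copy), like A.

-- ===== PORT A =====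
def otherSol (phone_book : List String) : Bool :=
  let hash : PySem.Dict String Int :=
    phone_book.foldl (fun d num => d.insert num 1) PySem.Dict.empty
  phone_book.foldl (fun answer num =>
    (num.toList.foldl (fun (st : List Char × Bool) n =>
        (st.1 ++ [n],
         if hash.contains (String.ofList (st.1 ++ [n])) && (String.ofList (st.1 ++ [n]) != num)
         then false else st.2))
      ([], answer)).2) true

-- ===== PORT B =====
def otherSol_alt (phone_book : List String) : Bool :=
  let s := PySem.List.sorted phone_book (fun x => x) false
  (PySem.List.pyRange 0 ((s.length : Int) - 1) 1).foldl (fun answer i =>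
    if (PySem.List.pyGetD s i "" != "") &&
       PySem.Str.startswith (PySem.List.pyGetD s (i + 1) "") (PySem.List.pyGetD s i "") &&
       (PySem.List.pyGetD s i "" != PySem.List.pyGetD s (i + 1) "") then false
    else answer) true

-- ===== PRECONDITION & SPEC =====
def Spec_otherSol (phone_book : List String) (out : Bool) : Prop :=
  out = otherSol_alt phone_book
instance (phone_book : List String) (out : Bool) : Decidable (Spec_otherSol phone_book out) := by
  unfold Spec_otherSol; infer_instance

-- ===== CLAIM (what is proved, stated in full; the proofs are below) =====
def Claim_equal_otherSol : Prop := ∀ (phone_book : List String), Dom_otherSol phone_book → Spec_otherSol phone_book (otherSol phone_book)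

-- ===== LEMMAS AND PROOFS =====

-- the proper-prefix-pair propositions the two ports decide
def PvPA (pb : List String) : Prop :=
  ∃ a ∈ pb, ∃ b ∈ pb, a ≠ "" ∧ a ≠ b ∧ a.toList <+: b.toList
-- ---- generic fold shapes ----
theorem pv_foldl_latch {α : Type} (c : α → Bool) :
    ∀ (l : List α) (b : Bool),
      l.foldl (fun ans i => if c i then false else ans) b = (b && !(l.any c)) := by
  intro l
  induction l with
  | nil => intro b; simp
  | cons x xs ih =>
    intro b
    simp only [List.foldl_cons]
    by_cases h : c x = true
    · rw [if_pos h, ih]; simp [h]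
    · rw [if_neg h, ih]; simp only [Bool.not_eq_true] at h; simp [h]

theorem pv_foldl_and {α : Type} (f : α → Bool) :
    ∀ (l : List α) (b : Bool),
      l.foldl (fun a x => a && f x) b = (b && l.all f) := by
  intro l
  induction l with
  | nil => intro b; simp
  | cons x xs ih => intro b; simp [ih, Bool.and_assoc]

-- ---- A side: the dict of numbers ----
theorem pv_contains_foldl_insert (xs : List String) :
    ∀ (d : PySem.Dict String Int) (k : String),
      (xs.foldl (fun d num => d.insert num 1) d).contains k
        = (d.contains k || decide (k ∈ xs)) := by
  induction xs with
  | nil => intro d k; simp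
  | cons x xs ih =>
    intro d k
    rw [List.foldl_cons, ih]
    rw [Bool.eq_iff_iff]
    simp [PySem.Dict.contains_insert]
    tauto

-- ---- A side: the inner prefix loop ----
-- the successive values of tmp in A's inner loop, starting from accumulator t
def pvPrefs : List Char → List Char → List (List Char)
  | _, [] => []
  | t, n :: cs => (t ++ [n]) :: pvPrefs (t ++ [n]) cs

theorem pv_mem_prefs : ∀ (cs t p : List Char),
    p ∈ pvPrefs t cs ↔ ∃ q, q ≠ [] ∧ q <+: cs ∧ p = t ++ q := by
  intro cs
  induction cs with
  | nil =>
    intro t p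
    constructor
    · intro h; simp [pvPrefs] at h
    · rintro ⟨q, hq, hpre, -⟩; exact absurd (List.prefix_nil.mp hpre) hq
  | cons n cs ih =>
    intro t p
    constructor
    · intro h
      rcases List.mem_cons.mp h with h | h
      · exact ⟨[n], by simp, ⟨cs, rfl⟩, h⟩
      · obtain ⟨q, hq, hpre, rfl⟩ := (ih (t ++ [n]) p).mp h
        exact ⟨n :: q, by simp, List.cons_prefix_cons.mpr ⟨rfl, hpre⟩, by simp⟩
    · rintro ⟨q, hq, hpre, rfl⟩
      obtain ⟨m, q', rfl⟩ : ∃ m q', q = m :: q' := by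
        cases q with
        | nil => exact absurd rfl hq
        | cons m q' => exact ⟨m, q', rfl⟩
      obtain ⟨heq, hpre'⟩ := List.cons_prefix_cons.mp hpre
      rcases eq_or_ne q' [] with rfl | hne
      · exact List.mem_cons.mpr (Or.inl (by simp [heq]))
      · exact List.mem_cons.mpr
          (Or.inr ((ih (t ++ [n]) (t ++ m :: q')).mpr ⟨q', hne, hpre', by simp [heq]⟩))

theorem pv_inner_latch (hash : PySem.Dict String Int) (num : String) :
    ∀ (cs t : List Char) (b : Bool),
      cs.foldl (fun (st : List Char × Bool) n =>
          (st.1 ++ [n],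
           if hash.contains (String.ofList (st.1 ++ [n])) && (String.ofList (st.1 ++ [n]) != num)
           then false else st.2))
        (t, b)
      = (t ++ cs,
         b && !((pvPrefs t cs).any
           (fun p => hash.contains (String.ofList p) && (String.ofList p != num)))) := by
  intro cs
  induction cs with
  | nil => intro t b; simp [pvPrefs]
  | cons n cs ih =>
    intro t b
    simp only [List.foldl_cons]
    rw [ih]
    simp only [pvPrefs, List.any_cons]
    cases h : hash.contains (String.ofList (t ++ [n])) && (String.ofList (t ++ [n]) != num) <;>
      simp

theorem pv_otherSol_true_iff (pb : List String) : otherSol pb = true ↔ ¬ PvPA pb := by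
  have hfun : (fun (answer : Bool) (num : String) =>
      (num.toList.foldl (fun (st : List Char × Bool) n =>
        (st.1 ++ [n],
         if (pb.foldl (fun d num => d.insert num 1)
               (PySem.Dict.empty : PySem.Dict String Int)).contains
              (String.ofList (st.1 ++ [n])) && (String.ofList (st.1 ++ [n]) != num)
         then false else st.2))
      ([], answer)).2)
      = (fun (answer : Bool) (num : String) => answer &&
          !((pvPrefs [] num.toList).any
            (fun p => decide (String.ofList p ∈ pb) && (String.ofList p != num)))) := by
    funext answer num
    rw [pv_inner_latch (pb.foldl (fun d num => d.insert num 1)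
          (PySem.Dict.empty : PySem.Dict String Int)) num]
    simp only [pv_contains_foldl_insert, PySem.Dict.contains_empty, Bool.false_or]
  have heq : otherSol pb = pb.foldl (fun (answer : Bool) (num : String) => answer &&
      !((pvPrefs [] num.toList).any
        (fun p => decide (String.ofList p ∈ pb) && (String.ofList p != num)))) true := by
    unfold otherSol
    exact congrArg (fun f => List.foldl f true pb) hfun
  rw [heq,
    pv_foldl_and (fun num => !((pvPrefs [] num.toList).any
      (fun p => decide (String.ofList p ∈ pb) && (String.ofList p != num)))) pb true]
  simp only [Bool.true_and, List.all_eq_true, Bool.not_eq_true', List.any_eq_false]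
  constructor
  · intro h ⟨a, ha, b, hb, hane, hab, hpre⟩
    have := h b hb a.toList ((pv_mem_prefs _ _ _).mpr
      ⟨a.toList, fun hc => hane (String.toList_inj.mp (by rw [hc]; decide)), hpre, by simp⟩)
    rw [String.ofList_toList, decide_eq_true ha, bne_iff_ne.mpr hab] at this
    simp at this
  · intro h num hnum p hp
    obtain ⟨q, hq, hpre, rfl⟩ := (pv_mem_prefs _ _ _).mp hp
    intro hmem
    obtain ⟨h1, h2⟩ := Bool.and_eq_true_iff.mp hmem
    exact h ⟨String.ofList p, of_decide_eq_true h1, num, hnum,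
      (fun hc => hq (by simpa using congrArg String.toList hc)),
      bne_iff_ne.mp h2, by simpa [String.toList_ofList] using hpre⟩

-- ---- ordered-list lemmas for the B side ----
theorem pv_lex_append {r : Char → Char → Prop} :
    ∀ (l t : List Char), t ≠ [] → List.Lex r l (l ++ t) := by
  intro l
  induction l with
  | nil =>
    intro t ht
    match t, ht with
    | c :: t', _ => exact List.Lex.nil
  | cons a l ih => intro t ht; exact List.Lex.cons (ih t ht)

theorem pv_str_prefix_lt (a b : String) (hp : a.toList <+: b.toList) (hne : a ≠ b) :
    a < b := by
  rw [String.lt_iff_toList_lt]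
  obtain ⟨t, ht⟩ := hp
  have htne : t ≠ [] := by
    rintro rfl
    exact hne (String.toList_inj.mp (by simpa using ht))
  exact (show List.Lex (· < ·) a.toList b.toList from ht ▸ pv_lex_append a.toList t htne)

theorem pv_cons_lt_cons_iff (a : Char) (u v : List Char) :
    (a :: u) < (a :: v) ↔ u < v := by
  constructor
  · intro h
    have h' : List.Lex (· < ·) (a :: u) (a :: v) := h
    cases h' with
    | cons h => exact h
    | rel h => exact absurd h (lt_irrefl a)
  · intro h; exact List.Lex.cons h

theorem pv_cons_le_cons_iff (a : Char) (u v : List Char) :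
    (a :: u) ≤ (a :: v) ↔ u ≤ v := by
  rw [← not_lt, ← not_lt, pv_cons_lt_cons_iff]

theorem pv_lex_sandwich :
    ∀ (x z y : List Char), x <+: y → x ≤ z → z ≤ y → x <+: z := by
  intro x
  induction x with
  | nil => intro z y _ _ _; exact List.nil_prefix
  | cons a x' ih =>
    intro z y hp hxz hzy
    obtain ⟨t, rfl⟩ := hp
    match z with
    | [] =>
      exact absurd (lt_of_lt_of_le (show ([] : List Char) < a :: x' from List.Lex.nil) hxz)
        (lt_irrefl _)
    | c :: z' =>
      rcases lt_trichotomy a c with hac | rfl | hca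
      · exact absurd (lt_of_le_of_lt hzy
          (show ((a :: x') ++ t : List Char) < c :: z' from List.Lex.rel hac)) (lt_irrefl _)
      · have hxz' : x' ≤ z' := (pv_cons_le_cons_iff a x' z').mp hxz
        have hzy' : z' ≤ x' ++ t := (pv_cons_le_cons_iff a z' (x' ++ t)).mp hzy
        exact List.cons_prefix_cons.mpr ⟨rfl, ih z' (x' ++ t) ⟨t, rfl⟩ hxz' hzy'⟩
      · exact absurd (lt_of_le_of_lt hxz (List.Lex.rel hca)) (lt_irrefl _)

theorem pv_str_sandwich (x z y : String) (hp : x.toList <+: y.toList)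
    (h1 : x ≤ z) (h2 : z ≤ y) : x.toList <+: z.toList :=
  pv_lex_sandwich x.toList z.toList y.toList hp
    (String.le_iff_toList_le.mp h1) (String.le_iff_toList_le.mp h2)

-- adjacency characterisation on a sorted list
def PvAdj (s : List String) : Prop :=
  ∃ k : Nat, k + 1 < s.length ∧ s.getD k "" ≠ "" ∧
    (s.getD k "").toList <+: (s.getD (k + 1) "").toList ∧ s.getD k "" ≠ s.getD (k + 1) ""

theorem pv_pair_to_adj :
    ∀ (s : List String), s.Pairwise (· ≤ ·) →
      ∀ a b, a ∈ s → b ∈ s → a ≠ "" → a ≠ b → a.toList <+: b.toList → PvAdj s := by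
  intro s
  induction s with
  | nil => intro _ a b ha; simp at ha
  | cons x t ih =>
    intro hs a b ha hb hane hab hpre
    obtain ⟨hx, ht⟩ := List.pairwise_cons.mp hs
    rcases List.mem_cons.mp ha with rfl | hat
    · -- a = x
      rcases List.mem_cons.mp hb with rfl | hbt
      · exact absurd rfl hab
      · match t, hbt with
        | z :: t', hbt =>
          by_cases hxz : a = z
          · obtain ⟨k, hk, hk0, hk1, hk2⟩ :=
              ih ht z b (List.mem_cons_self) hbt (hxz ▸ hane) (hxz ▸ hab) (hxz ▸ hpre)
            exact ⟨k + 1, by simpa using hk, by simpa using hk0, by simpa using hk1,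
              by simpa using hk2⟩
          · refine ⟨0, by simp, by simpa using hane, ?_, by simpa using hxz⟩
            simp only [List.getD_cons_zero, List.getD_cons_succ]
            rcases List.mem_cons.mp hbt with rfl | hbt'
            · exact hpre
            · exact pv_str_sandwich a z b hpre (hx z List.mem_cons_self)
                (List.rel_of_pairwise_cons ht hbt')
    · rcases List.mem_cons.mp hb with rfl | hbt
      · -- b = x, a ∈ t : contradiction with sortedness
        exact absurd (lt_of_le_of_lt (hx a hat) (pv_str_prefix_lt a b hpre hab)) (lt_irrefl _)
      · obtain ⟨k, hk, hk0, hk1, hk2⟩ := ih ht a b hat hbt hane hab hpre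
        exact ⟨k + 1, by simpa using hk, by simpa using hk0, by simpa using hk1,
          by simpa using hk2⟩

theorem pv_adj_to_pair (s : List String) (h : PvAdj s) :
    ∃ a ∈ s, ∃ b ∈ s, a ≠ "" ∧ a ≠ b ∧ a.toList <+: b.toList := by
  obtain ⟨k, hk, hk0, hk1, hk2⟩ := h
  have h1 : s.getD k "" ∈ s := by
    rw [List.getD_eq_getElem s "" (by omega)]; exact List.getElem_mem _
  have h2 : s.getD (k + 1) "" ∈ s := by
    rw [List.getD_eq_getElem s "" hk]; exact List.getElem_mem _
  exact ⟨s.getD k "", h1, s.getD (k + 1) "", h2, hk0, hk2, hk1⟩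

-- B's loop flags an index iff the sorted list has an adjacent proper-prefix pair
theorem pv_any_range_iff (s : List String) :
    ((PySem.List.pyRange 0 ((s.length : Int) - 1) 1).any (fun i =>
        (PySem.List.pyGetD s i "" != "") &&
        PySem.Str.startswith (PySem.List.pyGetD s (i + 1) "") (PySem.List.pyGetD s i "") &&
        (PySem.List.pyGetD s i "" != PySem.List.pyGetD s (i + 1) "")) = true)
      ↔ PvAdj s := by
  rw [List.any_eq_true]
  constructor
  · rintro ⟨i, hi, hc⟩
    obtain ⟨h0, h1⟩ := (PySem.List.mem_pyRange_one).mp hi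
    obtain ⟨k, rfl⟩ : ∃ k : Nat, i = (k : Int) := ⟨i.toNat, (Int.toNat_of_nonneg h0).symm⟩
    have hk : k + 1 < s.length := by omega
    rw [show ((k : Int) + 1) = ((k + 1 : Nat) : Int) by push_cast; ring] at hc
    simp only [PySem.List.pyGetD_natCast, Bool.and_eq_true, PySem.Str.startswith_eq,
      bne_iff_ne, ne_eq] at hc
    exact ⟨k, hk, hc.1.1, (PySem.Chars.startswith_iff _ _).mp hc.1.2, hc.2⟩
  · rintro ⟨k, hk, hk0, hk1, hk2⟩
    refine ⟨(k : Int), PySem.List.mem_pyRange_one.mpr ⟨by positivity, by omega⟩, ?_⟩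
    rw [show ((k : Int) + 1) = ((k + 1 : Nat) : Int) by push_cast; ring]
    simp only [PySem.List.pyGetD_natCast, Bool.and_eq_true, PySem.Str.startswith_eq,
      bne_iff_ne, ne_eq]
    exact ⟨⟨hk0, (PySem.Chars.startswith_iff _ _).mpr hk1⟩, hk2⟩

theorem pv_otherSol_alt_true_iff (pb : List String) : otherSol_alt pb = true ↔ ¬ PvPA pb := by
  unfold otherSol_alt
  rw [pv_foldl_latch _ _ true]
  simp only [Bool.true_and, Bool.not_eq_eq_eq_not, Bool.not_true, ← Bool.not_eq_true]
  rw [not_iff_not]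
  rw [pv_any_range_iff]
  constructor
  · intro h
    obtain ⟨a, ha, b, hb, hane, hab, hpre⟩ := pv_adj_to_pair _ h
    exact ⟨a, (PySem.List.mem_sorted _ _ _ _).mp ha, b,
      (PySem.List.mem_sorted _ _ _ _).mp hb, hane, hab, hpre⟩
  · rintro ⟨a, ha, b, hb, hane, hab, hpre⟩
    have hs : (PySem.List.sorted pb (fun x => x) false).Pairwise (· ≤ ·) := by
      simpa using PySem.List.sorted_pairwise (xs := pb) (key := fun x => x)
    exact pv_pair_to_adj _ hs a b ((PySem.List.mem_sorted _ _ _ _).mpr ha)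
      ((PySem.List.mem_sorted _ _ _ _).mpr hb) hane hab hpre

-- ===== VERDICT (by name: the statement is the Claim_ definition above) =====
theorem otherSol_spec : Claim_equal_otherSol := by
  intro pb _
  show otherSol pb = otherSol_alt pb
  have hA := pv_otherSol_true_iff pb
  have hB := pv_otherSol_alt_true_iff pb
  cases cA : otherSol pb <;> cases cB : otherSol_alt pb
  · rfl
  · rw [cA] at hA; rw [cB] at hB
    have hPA : PvPA pb := by
      by_contra h
      exact Bool.false_ne_true (hA.mpr h)
    exact absurd hPA (hB.mp rfl)
  · rw [cA] at hA; rw [cB] at hB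
    have hPA : PvPA pb := by
      by_contra h
      exact Bool.false_ne_true (hB.mpr h)
    exact absurd hPA (hA.mp rfl)
  · rfl
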